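-- pv_equiv track=rewrite | github.com/MehdiZouitine/IDAO-Qualifier-2020 | utils.py | period_24
-- ===== SOURCE A (Python) =====
-- def period_24(x):
--     res = [0]
--     n = len(x)
--     k = 1
--     for i in range (1,n):
--         if x[i]< 5:
--             res.append(res[-1])
--         else:
--             res.append(k%24)
--             k+=1
--     return res
-- ===== SOURCE B (Python) =====
-- def period_24(x):
--     # run-length construction: find the positions where the counter bumps,
--     # then emit the result as constant runs between consecutive bump positions
--     n = len(x)
--     pos = [j for j in range(1, n) if not x[j] < 5]
--     res = [0]
--     prev = 1
--     for k, p in enumerate(pos):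
--         res += [k % 24] * (p - prev) + [(k + 1) % 24]
--         prev = p + 1
--     res += [len(pos) % 24] * (n - prev)
--     return res
-- ===== Notes on version B (the rewrite author's own statement) =====
-- stated objective: alternative
-- what changed: B replaces A's per-element loop that copies the last value or bumps a running mod-24 counter with a two-phase run-length construction: it first extracts the list of bump positions (indices with x[j] >= 5), then emits the result as constant runs between consecutive bump positions.
import Mathlib
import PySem

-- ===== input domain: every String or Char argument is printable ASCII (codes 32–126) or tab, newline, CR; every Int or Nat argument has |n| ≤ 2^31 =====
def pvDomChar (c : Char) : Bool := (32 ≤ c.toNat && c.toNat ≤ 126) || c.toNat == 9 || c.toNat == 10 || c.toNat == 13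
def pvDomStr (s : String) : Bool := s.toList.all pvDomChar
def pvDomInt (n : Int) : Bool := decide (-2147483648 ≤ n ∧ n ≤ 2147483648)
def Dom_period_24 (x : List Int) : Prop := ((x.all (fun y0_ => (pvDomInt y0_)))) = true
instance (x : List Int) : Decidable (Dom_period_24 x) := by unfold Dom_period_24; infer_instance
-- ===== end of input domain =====

-- B rebuilds the result as constant runs between the bump positions instead of A's
-- per-element copy/bump loop; same cost, different construction ("alternative").

-- ===== PORT A =====
-- A: start from res = [0], k = 1; for i in range(1, n): repeat res[-1] if x[i] < 5,
-- else append k % 24 and bump k.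
def period_24 (x : List Int) : List Int :=
  let n := PySem.List.len x
  ((PySem.List.pyRange 1 n 1).foldl
    (fun (st : List Int × Int) i =>
      if PySem.List.pyGetD x i 0 < 5 then
        (st.1 ++ [PySem.List.pyGetD st.1 (-1) 0], st.2)
      else
        (st.1 ++ [PySem.Int.mod st.2 24], st.2 + 1))
    ([0], 1)).1

-- ===== PORT B =====
-- B: pos = bump positions (indices j in 1..n-1 with not x[j] < 5); then emit
-- constant runs: [k%24] * (p - prev) + [(k+1)%24] per pos element, then the tail run.
def period_24_alt (x : List Int) : List Int :=
  let n := PySem.List.len x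
  let pos := (PySem.List.pyRange 1 n 1).filter (fun j => !(PySem.List.pyGetD x j 0 < 5))
  let st := (PySem.List.enumerate pos).foldl
    (fun (st : List Int × Int) kp =>
      (st.1 ++ List.replicate (kp.2 - st.2).toNat (PySem.Int.mod kp.1 24)
            ++ [PySem.Int.mod (kp.1 + 1) 24], kp.2 + 1))
    ([0], 1)
  st.1 ++ List.replicate (n - st.2).toNat (PySem.Int.mod (PySem.List.len pos) 24)

-- ===== PRECONDITION & SPEC =====
def Spec_period_24 (x : List Int) (out : List Int) : Prop := out = period_24_alt x
instance (x : List Int) (out : List Int) : Decidable (Spec_period_24 x out) := by unfold Spec_period_24; infer_instance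

-- ===== CLAIM =====
def Claim_equal_period_24 : Prop := ∀ (x : List Int), Dom_period_24 x → Spec_period_24 x (period_24 x)

-- ===== LEMMAS AND PROOFS =====

-- reference: the tail of the common result, fed with the running count c
def pvBuild : List Int → Int → List Int
  | [], _ => []
  | v :: t, c =>
    let c' := if v < 5 then c else c + 1
    PySem.Int.mod c' 24 :: pvBuild t c'

-- bump positions of tail t, with base index b
def pvPos : List Int → Int → List Int
  | [], _ => []
  | v :: t, b => if v < 5 then pvPos t (b + 1) else b :: pvPos t (b + 1)

-- run construction with stop index n
def pvRuns (n : Int) : List Int → Int → Int → List Int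
  | [], prev, k => List.replicate (n - prev).toNat (PySem.Int.mod k 24)
  | p :: rest, prev, k =>
      List.replicate (p - prev).toNat (PySem.Int.mod k 24)
        ++ PySem.Int.mod (k + 1) 24 :: pvRuns n rest (p + 1) (k + 1)

theorem pvGetD_last (res : List Int) (w : Int) :
    PySem.List.pyGetD (res ++ [w]) (-1) 0 = w := by
  simp [PySem.List.pyGetD, PySem.List.pyGet?, PySem.List.pyIdx?]

theorem pvLoopA (t : List Int) : ∀ (res : List Int) (k : Int),
    PySem.List.pyGetD res (-1) 0 = PySem.Int.mod (k - 1) 24 →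
    (t.foldl
      (fun (st : List Int × Int) v =>
        if v < 5 then (st.1 ++ [PySem.List.pyGetD st.1 (-1) 0], st.2)
        else (st.1 ++ [PySem.Int.mod st.2 24], st.2 + 1))
      (res, k)).1 = res ++ pvBuild t (k - 1) := by
  induction t with
  | nil => intro res k _; simp [pvBuild]
  | cons v t ih =>
    intro res k hlast
    by_cases hv : v < 5
    · simp only [List.foldl_cons, if_pos hv, hlast]
      rw [ih (res ++ [PySem.Int.mod (k - 1) 24]) k (pvGetD_last _ _)]
      simp [pvBuild, hv]
    · simp only [List.foldl_cons, if_neg hv]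
      rw [ih (res ++ [PySem.Int.mod k 24]) (k + 1) (by rw [pvGetD_last]; norm_num)]
      simp [pvBuild, hv]

-- the filter comprehension computes pvPos of the dropped tail
theorem pvFilterPos (x : List Int) : ∀ (b : Int), 0 ≤ b →
    (PySem.List.pyRange b (PySem.List.len x) 1).filter
      (fun j => !(PySem.List.pyGetD x j 0 < 5)) = pvPos (x.drop b.toNat) b := by
  suffices h : ∀ (m : Nat) (b : Int), 0 ≤ b → (PySem.List.len x - b).toNat = m →
      (PySem.List.pyRange b (PySem.List.len x) 1).filter
        (fun j => !(PySem.List.pyGetD x j 0 < 5)) = pvPos (x.drop b.toNat) b by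
    intro b hb; exact h _ b hb rfl
  intro m
  induction m with
  | zero =>
    intro b hb hm
    have hlen : PySem.List.len x = (x.length : Int) := by simp [PySem.List.len_eq]
    have hge : (x.length : Int) ≤ b := by omega
    rw [PySem.List.pyRange_one_eq_nil (by omega)]
    rw [List.drop_eq_nil_of_le (by omega)]
    simp [pvPos]
  | succ m ih =>
    intro b hb hm
    have hlen : PySem.List.len x = (x.length : Int) := by simp [PySem.List.len_eq]
    have hlt : b < (x.length : Int) := by omega
    have hbn : b.toNat < x.length := by omega
    rw [PySem.List.pyRange_one_cons (by omega)]
    rw [List.filter_cons]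
    have hget : PySem.List.pyGetD x b 0 = x[b.toNat] :=
      PySem.List.pyGetD_eq_getElem (xs := x) (i := b) (d := 0) hb (by omega)
    have hdrop : x.drop b.toNat = x[b.toNat] :: x.drop (b.toNat + 1) :=
      (List.drop_eq_getElem_cons hbn)
    have hnext : (b + 1).toNat = b.toNat + 1 := by omega
    have ihres := ih (b + 1) (by omega) (by omega)
    rw [hnext] at ihres
    by_cases hv : x[b.toNat] < 5
    · rw [hdrop]
      simp only [pvPos, hget, hv]
      simpa using ihres
    · rw [hdrop]
      simp only [pvPos, if_neg hv, hget]
      have : (!decide (x[b.toNat] < 5)) = true := by simp [hv]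
      rw [this]
      simpa using ihres

-- all bump positions are ≥ base
theorem pvPos_ge (t : List Int) : ∀ (b : Int), ∀ p ∈ pvPos t b, b ≤ p := by
  induction t with
  | nil => intro b p hp; simp [pvPos] at hp
  | cons v t ih =>
    intro b p hp
    by_cases hv : v < 5
    · simp only [pvPos, if_pos hv] at hp
      have := ih (b + 1) p hp; omega
    · simp only [pvPos, if_neg hv, List.mem_cons] at hp
      rcases hp with h | h
      · omega
      · have := ih (b + 1) p h; omega

-- advancing prev by one peels one element of the current run
theorem pvRuns_peel (n : Int) (pos : List Int) (b k : Int)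
    (hge : ∀ p ∈ pos, b + 1 ≤ p) (hn : b + 1 ≤ n) :
    pvRuns n pos b k = PySem.Int.mod k 24 :: pvRuns n pos (b + 1) k := by
  cases pos with
  | nil =>
    have : (n - b).toNat = (n - (b + 1)).toNat + 1 := by omega
    simp [pvRuns, this, List.replicate_succ]
  | cons p rest =>
    have hp : b + 1 ≤ p := hge p (by simp)
    have : (p - b).toNat = (p - (b + 1)).toNat + 1 := by omega
    simp [pvRuns, this, List.replicate_succ]

-- key: run construction from bump positions equals the reference build
theorem pvRunsPos (t : List Int) : ∀ (b k : Int),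
    pvRuns (b + t.length) (pvPos t b) b k = pvBuild t k := by
  induction t with
  | nil => intro b k; simp [pvPos, pvRuns, pvBuild]
  | cons v t ih =>
    intro b k
    have hlen : (b + (v :: t).length : Int) = (b + 1) + t.length := by
      simp; omega
    by_cases hv : v < 5
    · rw [hlen]
      simp only [pvPos, if_pos hv]
      rw [pvRuns_peel _ _ _ _ (fun p hp => pvPos_ge t (b + 1) p hp) (by omega)]
      rw [ih (b + 1) k]
      simp [pvBuild, hv]
    · rw [hlen]
      simp only [pvPos, if_neg hv, pvRuns]
      rw [ih (b + 1) (k + 1)]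
      simp [pvBuild, hv]

-- B's foldl over enumerate equals pvRuns (with the tail run appended)
theorem pvLoopB (n : Int) (pos : List Int) : ∀ (k0 prev : Int) (acc : List Int),
    ((PySem.List.enumerate pos k0).foldl
      (fun (st : List Int × Int) kp =>
        (st.1 ++ List.replicate (kp.2 - st.2).toNat (PySem.Int.mod kp.1 24)
              ++ [PySem.Int.mod (kp.1 + 1) 24], kp.2 + 1))
      (acc, prev)).1
      ++ List.replicate
          (n - ((PySem.List.enumerate pos k0).foldl
            (fun (st : List Int × Int) kp =>
              (st.1 ++ List.replicate (kp.2 - st.2).toNat (PySem.Int.mod kp.1 24)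
                    ++ [PySem.Int.mod (kp.1 + 1) 24], kp.2 + 1))
            (acc, prev)).2).toNat
          (PySem.Int.mod (k0 + pos.length) 24)
    = acc ++ pvRuns n pos prev k0 := by
  induction pos with
  | nil => intro k0 prev acc; simp [PySem.List.enumerate_nil, pvRuns]
  | cons p rest ih =>
    intro k0 prev acc
    rw [PySem.List.enumerate_cons]
    simp only [List.foldl_cons]
    have h := ih (k0 + 1) (p + 1)
      (acc ++ List.replicate (p - prev).toNat (PySem.Int.mod k0 24)
           ++ [PySem.Int.mod (k0 + 1) 24])
    rw [show (k0 + ((p :: rest).length : Int)) = (k0 + 1) + (rest.length : Int) by simp; omega]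
    rw [h]
    simp [pvRuns]

-- ===== VERDICT =====
theorem period_24_spec : Claim_equal_period_24 := by
  intro x _
  unfold Spec_period_24 period_24 period_24_alt
  simp only []
  rw [PySem.List.foldl_pyRange_pyGetD (a := 1) (xs := x) (d := 0)
      (f := fun (st : List Int × Int) v =>
        if v < 5 then (st.1 ++ [PySem.List.pyGetD st.1 (-1) 0], st.2)
        else (st.1 ++ [PySem.Int.mod st.2 24], st.2 + 1))
      (init := ([0], 1)) (by omega)]
  rw [pvLoopA (x.drop (1 : Int).toNat) [0] 1 (by decide)]
  rw [pvFilterPos x 1 (by omega)]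
  rw [show PySem.List.len (pvPos (x.drop (1 : Int).toNat) 1)
        = (0 : Int) + ((pvPos (x.drop (1 : Int).toNat) 1).length : Int) by
      simp [PySem.List.len_eq]]
  rw [pvLoopB (PySem.List.len x) (pvPos (x.drop (1 : Int).toNat) 1) 0 1 [0]]
  cases x with
  | nil => simp [pvPos, pvRuns, pvBuild]
  | cons a t =>
    have hlen : PySem.List.len (a :: t) = (1 : Int) + t.length := by
      simp [PySem.List.len_eq]; omega
    rw [hlen]
    rw [show ((1 : Int).toNat) = 1 from rfl]
    simp only [List.drop_succ_cons, List.drop_zero]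
    rw [pvRunsPos t 1 0]
    norm_num
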